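-- pv_equiv track=rewrite | github.com/pawlowiczf/WDI-2023 | WDI zestaw 6/32.py | zad32
-- ===== SOURCE A (Python) =====
-- def zad32(T, k):
--
--     def rek(T, k, i, X,Y,x_size, y_size):
--         if x_size + y_size == k:
--             x_sum, y_sum = 0, 0
--             for j in range(x_size):
--                 x_sum += X[j]
--             for k in range(y_size):
--                 y_sum += Y[k]
--             return x_sum==y_sum
--
--         if i == len(T):
--             return False
--
--         if x_size==k-1:
--             if rek(T, k, i+1, X,Y,x_size, y_size):
--                 return True
--             Y[y_size] = T[i]
--             return rek(T,k, i+1, X, Y, x_size, y_size+1)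
--
--         if y_size==k-1:
--             if rek(T, k, i+1, X,Y,x_size, y_size):
--                 return True
--             X[x_size] = T[i]
--             return rek(T,k, i+1, X, Y, x_size+1, y_size)
--
--         X[x_size] = T[i]
--         Y[y_size] = T[i]
--         return rek(T, k, i+1, X,Y,x_size, y_size) or rek(T,k,i+1, X,Y, x_size+1, y_size) or rek(T, k, i+1, X,Y,x_size, y_size+1)
--
--     #end def
--     return rek(T,k,0,[0]*(k-1), [0]*(k-1), 0, 0)
-- ===== SOURCE B (Python) =====
-- def zad32(T, k):
--     # Iterative re-implementation: the recursion is defunctionalized into an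
--     # explicit stack of frames with a result register; frames carry the number
--     # m of elements still available (m = len(T) - i).
--     n = len(T)
--     size = k - 1 if k > 1 else 0
--     X = [0] * size
--     Y = [0] * size
--     stack = [("call", n, 0, 0)]
--     result = False
--     while stack:
--         tag, m, x, y = stack.pop()
--         if tag == "call":
--             if x + y == k:
--                 result = sum(X[:x]) == sum(Y[:y])
--             elif m == 0:
--                 result = False
--             elif x == k - 1:
--                 stack.append(("xfull", m, x, y))
--                 stack.append(("call", m - 1, x, y))
--             elif y == k - 1:
--                 stack.append(("yfull", m, x, y))
--                 stack.append(("call", m - 1, x, y))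
--             else:
--                 X[x] = T[n - m]
--                 Y[y] = T[n - m]
--                 stack.append(("gen1", m, x, y))
--                 stack.append(("call", m - 1, x, y))
--         elif tag == "xfull":
--             if not result:
--                 Y[y] = T[n - m]
--                 stack.append(("call", m - 1, x, y + 1))
--         elif tag == "yfull":
--             if not result:
--                 X[x] = T[n - m]
--                 stack.append(("call", m - 1, x + 1, y))
--         elif tag == "gen1":
--             if not result:
--                 stack.append(("gen2", m, x, y))
--                 stack.append(("call", m - 1, x + 1, y))
--         else:  # gen2
--             if not result:
--                 stack.append(("call", m - 1, x, y + 1))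
--     return result
-- ===== Notes on version B (the rewrite author's own statement) =====
-- stated objective: alternative
-- what changed: A's mutating nested recursion (with its shared scratch arrays and short-circuit 'or') is re-decomposed into an iterative engine: a while loop over an explicit stack of defunctionalized continuation frames keyed by the count of remaining elements, with a result register; the two hand-written summing loops become sum(X[:x]).
import Mathlib
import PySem

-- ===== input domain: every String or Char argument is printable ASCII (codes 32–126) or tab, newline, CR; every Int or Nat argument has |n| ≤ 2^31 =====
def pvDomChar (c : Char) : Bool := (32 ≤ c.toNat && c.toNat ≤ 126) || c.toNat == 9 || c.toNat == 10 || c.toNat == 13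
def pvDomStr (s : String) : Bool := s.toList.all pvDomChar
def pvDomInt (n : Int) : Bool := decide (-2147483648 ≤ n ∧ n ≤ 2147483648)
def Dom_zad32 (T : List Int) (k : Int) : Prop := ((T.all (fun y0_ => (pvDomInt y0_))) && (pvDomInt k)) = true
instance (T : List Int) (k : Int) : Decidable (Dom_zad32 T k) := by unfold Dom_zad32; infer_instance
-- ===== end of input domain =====

-- B re-implements A's backtracking search as an iterative engine: an explicit stack of
-- defunctionalized continuation frames plus a result register (objective: alternative
-- decomposition, same cost).  Return values only; neither version mutates its arguments.

-- ===== PORT A =====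

-- T[i] (indices used by both programs are provably in range on Pre_ inputs)
def pvElem (T : List Int) (i : Int) : Int := (PySem.List.pyGet? T i).getD 0

-- A's "x_sum = 0; for j in range(x_size): x_sum += X[j]" summing loop
def pvSumLoop (X : List Int) (c : Int) : Int :=
  (List.range c.toNat).foldl (fun s j => s + X.getD j 0) 0

-- A's inner 'rek'; the Nat argument is fuel (A recurses at most len(T)+1 deep)
def rekA (T : List Int) (k : Int) : Nat → Int → Int → Int → List Int → List Int →
    Bool × List Int × List Int
  | 0, _, _, _, X, Y => (false, X, Y)  -- fuel exhausted: unreachable from zad32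
  | f + 1, i, x, y, X, Y =>
    if x + y == k then
      (pvSumLoop X x == pvSumLoop Y y, X, Y)
    else if i == (T.length : Int) then
      (false, X, Y)
    else if x == k - 1 then
      let r1 := rekA T k f (i + 1) x y X Y
      if r1.1 then r1
      else rekA T k f (i + 1) x (y + 1) r1.2.1 (r1.2.2.set y.toNat (pvElem T i))
    else if y == k - 1 then
      let r1 := rekA T k f (i + 1) x y X Y
      if r1.1 then r1
      else rekA T k f (i + 1) (x + 1) y (r1.2.1.set x.toNat (pvElem T i)) r1.2.2
    else
      let X0 := X.set x.toNat (pvElem T i)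
      let Y0 := Y.set y.toNat (pvElem T i)
      let r1 := rekA T k f (i + 1) x y X0 Y0
      if r1.1 then r1
      else
        let r2 := rekA T k f (i + 1) (x + 1) y r1.2.1 r1.2.2
        if r2.1 then r2
        else rekA T k f (i + 1) x (y + 1) r2.2.1 r2.2.2

def zad32 (T : List Int) (k : Int) : Bool :=
  (rekA T k (T.length + 1) 0 0 0
    (List.replicate (k - 1).toNat 0) (List.replicate (k - 1).toNat 0)).1

-- ===== PORT B =====

-- defunctionalized continuation frames; m = number of elements still available
inductive PvFrame : Type
  | call  : Nat → Int → Int → PvFrame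
  | xfull : Nat → Int → Int → PvFrame
  | yfull : Nat → Int → Int → PvFrame
  | gen1  : Nat → Int → Int → PvFrame
  | gen2  : Nat → Int → Int → PvFrame
deriving DecidableEq, Repr

-- termination measure for the while loop
def pvW : PvFrame → Nat
  | .call m _ _  => 8 ^ (m + 1)
  | .xfull m _ _ => 8 ^ m + 10
  | .yfull m _ _ => 8 ^ m + 10
  | .gen1 m _ _  => 2 * 8 ^ m + 20
  | .gen2 m _ _  => 8 ^ m + 10

def pvWsum (S : List PvFrame) : Nat := (S.map pvW).sum

-- the while loop of Source B: pop a frame, act on it.  The loop is ported with a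
-- fuel argument; zad32_alt passes pvWsum of the initial stack, which provably
-- suffices (pvRun_fuel below), so the port computes exactly what the loop does.
def pvRun (T : List Int) (k : Int) : Nat → List PvFrame → Bool → List Int → List Int → Bool
  | 0, _, res, _, _ => res  -- fuel exhausted: never reached from zad32_alt
  | _ + 1, [], res, _, _ => res
  | fuel + 1, PvFrame.call m x y :: K, res, X, Y =>
    if x + y == k then
      pvRun T k fuel K (((X.take x.toNat).sum : Int) == (Y.take y.toNat).sum) X Y
    else
      match m with
      | 0 => pvRun T k fuel K false X Y
      | m' + 1 =>
        if x == k - 1 then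
          pvRun T k fuel (PvFrame.call m' x y :: PvFrame.xfull (m' + 1) x y :: K) res X Y
        else if y == k - 1 then
          pvRun T k fuel (PvFrame.call m' x y :: PvFrame.yfull (m' + 1) x y :: K) res X Y
        else
          let v := pvElem T ((T.length : Int) - ((m' + 1 : Nat) : Int))
          pvRun T k fuel (PvFrame.call m' x y :: PvFrame.gen1 (m' + 1) x y :: K) res
            (X.set x.toNat v) (Y.set y.toNat v)
  | fuel + 1, PvFrame.xfull m x y :: K, res, X, Y =>
    if res then pvRun T k fuel K res X Y
    else pvRun T k fuel (PvFrame.call (m - 1) x (y + 1) :: K) res X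
      (Y.set y.toNat (pvElem T ((T.length : Int) - (m : Int))))
  | fuel + 1, PvFrame.yfull m x y :: K, res, X, Y =>
    if res then pvRun T k fuel K res X Y
    else pvRun T k fuel (PvFrame.call (m - 1) (x + 1) y :: K) res
      (X.set x.toNat (pvElem T ((T.length : Int) - (m : Int)))) Y
  | fuel + 1, PvFrame.gen1 m x y :: K, res, X, Y =>
    if res then pvRun T k fuel K res X Y
    else pvRun T k fuel (PvFrame.call (m - 1) (x + 1) y :: PvFrame.gen2 m x y :: K) res X Y
  | fuel + 1, PvFrame.gen2 m x y :: K, res, X, Y =>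
    if res then pvRun T k fuel K res X Y
    else pvRun T k fuel (PvFrame.call (m - 1) x (y + 1) :: K) res X Y

def zad32_alt (T : List Int) (k : Int) : Bool :=
  pvRun T k (pvWsum [PvFrame.call T.length 0 0]) [PvFrame.call T.length 0 0] false
    (List.replicate (if k > 1 then k - 1 else 0 : Int).toNat 0)
    (List.replicate (if k > 1 then k - 1 else 0 : Int).toNat 0)

-- ===== PRECONDITION & SPEC =====
-- Pre_ excludes exactly the inputs on which the Python A raises IndexError
-- (a nonempty T with k = 1 or k < 0: A then writes into an empty scratch array).
def Pre_zad32 (T : List Int) (k : Int) : Prop := T = [] ∨ k = 0 ∨ 2 ≤ k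
instance (T : List Int) (k : Int) : Decidable (Pre_zad32 T k) := by unfold Pre_zad32; infer_instance
def pvWitness_zad32 : List Int × Int := ([1, 2, 3], 3)

def Spec_zad32 (T : List Int) (k : Int) (out : Bool) : Prop := out = zad32_alt T k
instance (T : List Int) (k : Int) (out : Bool) : Decidable (Spec_zad32 T k out) := by unfold Spec_zad32; infer_instance

-- ===== CLAIM (what is proved, stated in full; the proofs are below) =====
def Claim_equal_zad32 : Prop := ∀ (T : List Int) (k : Int), Dom_zad32 T k → Pre_zad32 T k → Spec_zad32 T k (zad32 T k)

-- ===== LEMMAS AND PROOFS =====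

-- cited by pvRunW's termination proof
lemma pv8pow (m : Nat) : 8 ^ (m - 1) * 8 ≤ 8 ^ m + 7 := by
  cases m with
  | zero => simp
  | succ n => rw [Nat.add_sub_cancel, ← pow_succ]; omega

lemma pvWsum_cons (f : PvFrame) (S : List PvFrame) : pvWsum (f :: S) = pvW f + pvWsum S := by
  simp [pvWsum]

lemma pvW_pos (fr : PvFrame) : 1 ≤ pvW fr := by
  cases fr with
  | call m x y => exact Nat.one_le_pow _ _ (by norm_num)
  | xfull m x y => exact le_trans (by norm_num) (Nat.le_add_left 10 (8 ^ m))
  | yfull m x y => exact le_trans (by norm_num) (Nat.le_add_left 10 (8 ^ m))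
  | gen1 m x y => exact le_trans (by norm_num) (Nat.le_add_left 20 (2 * 8 ^ m))
  | gen2 m x y => exact le_trans (by norm_num) (Nat.le_add_left 10 (8 ^ m))

-- proof-only: the while loop as a well-founded recursion over the measure pvWsum
def pvRunW (T : List Int) (k : Int) (S : List PvFrame) (res : Bool) (X Y : List Int) : Bool :=
  match S with
  | [] => res
  | PvFrame.call m x y :: K =>
    if x + y == k then
      pvRunW T k K (((X.take x.toNat).sum : Int) == (Y.take y.toNat).sum) X Y
    else
      match m with
      | 0 => pvRunW T k K false X Y
      | m' + 1 =>
        if x == k - 1 then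
          pvRunW T k (PvFrame.call m' x y :: PvFrame.xfull (m' + 1) x y :: K) res X Y
        else if y == k - 1 then
          pvRunW T k (PvFrame.call m' x y :: PvFrame.yfull (m' + 1) x y :: K) res X Y
        else
          let v := pvElem T ((T.length : Int) - ((m' + 1 : Nat) : Int))
          pvRunW T k (PvFrame.call m' x y :: PvFrame.gen1 (m' + 1) x y :: K) res
            (X.set x.toNat v) (Y.set y.toNat v)
  | PvFrame.xfull m x y :: K =>
    if res then pvRunW T k K res X Y
    else pvRunW T k (PvFrame.call (m - 1) x (y + 1) :: K) res X
      (Y.set y.toNat (pvElem T ((T.length : Int) - (m : Int))))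
  | PvFrame.yfull m x y :: K =>
    if res then pvRunW T k K res X Y
    else pvRunW T k (PvFrame.call (m - 1) (x + 1) y :: K) res
      (X.set x.toNat (pvElem T ((T.length : Int) - (m : Int)))) Y
  | PvFrame.gen1 m x y :: K =>
    if res then pvRunW T k K res X Y
    else pvRunW T k (PvFrame.call (m - 1) (x + 1) y :: PvFrame.gen2 m x y :: K) res X Y
  | PvFrame.gen2 m x y :: K =>
    if res then pvRunW T k K res X Y
    else pvRunW T k (PvFrame.call (m - 1) x (y + 1) :: K) res X Y
termination_by pvWsum S
decreasing_by
  all_goals simp only [pvWsum_cons, pvW, pow_succ]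
  all_goals (try have h1 : 1 ≤ 8 ^ m := Nat.one_le_pow _ _ (by norm_num))
  all_goals (try have h2 : 1 ≤ 8 ^ m' := Nat.one_le_pow _ _ (by norm_num))
  all_goals (try have h5 := pv8pow m)
  all_goals omega

-- the fuel zad32_alt passes suffices: the fueled loop equals the well-founded one
lemma pvRun_fuel (T : List Int) (k : Int) :
    ∀ (fuel : Nat) (S : List PvFrame) (res : Bool) (X Y : List Int),
      pvWsum S ≤ fuel → pvRun T k fuel S res X Y = pvRunW T k S res X Y := by
  intro fuel
  induction fuel with
  | zero =>
    intro S res X Y hS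
    cases S with
    | nil => rw [pvRun, pvRunW.eq_def]
    | cons fr K => have := pvW_pos fr; rw [pvWsum_cons] at hS; omega
  | succ fuel ih =>
    intro S res X Y hS
    cases S with
    | nil => rw [pvRun, pvRunW.eq_def]
    | cons fr K =>
      rw [pvWsum_cons] at hS
      cases fr with
      | call m x y =>
        have hp : 1 ≤ 8 ^ (m + 1) := Nat.one_le_pow _ _ (by norm_num)
        simp only [pvW] at hS
        cases m with
        | zero =>
          rw [pvRun.eq_def, pvRunW.eq_def]
          simp only [beq_iff_eq]
          by_cases hxy : x + y = k
          · rw [if_pos hxy, if_pos hxy]; exact ih _ _ _ _ (by omega)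
          · rw [if_neg hxy, if_neg hxy]; exact ih _ _ _ _ (by omega)
        | succ m' =>
          have h8 : 8 ≤ 8 ^ (m' + 1) := by
            calc (8 : Nat) = 8 ^ 1 := by norm_num
            _ ≤ 8 ^ (m' + 1) := Nat.pow_le_pow_right (by norm_num) (by omega)
          have hss : 8 ^ (m' + 1 + 1) = 8 * 8 ^ (m' + 1) := by rw [pow_succ]; ring
          rw [pvRun.eq_def, pvRunW.eq_def]
          simp only [beq_iff_eq]
          by_cases hxy : x + y = k
          · rw [if_pos hxy, if_pos hxy]; exact ih _ _ _ _ (by omega)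
          · rw [if_neg hxy, if_neg hxy]
            by_cases hx : x = k - 1
            · rw [if_pos hx, if_pos hx]
              exact ih _ _ _ _ (by rw [pvWsum_cons, pvWsum_cons]; simp only [pvW]; omega)
            · rw [if_neg hx, if_neg hx]
              by_cases hy : y = k - 1
              · rw [if_pos hy, if_pos hy]
                exact ih _ _ _ _ (by rw [pvWsum_cons, pvWsum_cons]; simp only [pvW]; omega)
              · rw [if_neg hy, if_neg hy]
                exact ih _ _ _ _ (by rw [pvWsum_cons, pvWsum_cons]; simp only [pvW]; omega)
      | xfull m x y =>
        have h5 := pv8pow m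
        simp only [pvW] at hS
        rw [pvRun.eq_def, pvRunW.eq_def]
        cases res with
        | true => simp only [if_true]; exact ih _ _ _ _ (by omega)
        | false =>
          simp only [Bool.false_eq_true, if_false]
          exact ih _ _ _ _ (by rw [pvWsum_cons]; simp only [pvW, ← pow_succ]; omega)
      | yfull m x y =>
        have h5 := pv8pow m
        simp only [pvW] at hS
        rw [pvRun.eq_def, pvRunW.eq_def]
        cases res with
        | true => simp only [if_true]; exact ih _ _ _ _ (by omega)
        | false =>
          simp only [Bool.false_eq_true, if_false]
          exact ih _ _ _ _ (by rw [pvWsum_cons]; simp only [pvW, ← pow_succ]; omega)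
      | gen1 m x y =>
        have h5 := pv8pow m
        simp only [pvW] at hS
        rw [pvRun.eq_def, pvRunW.eq_def]
        cases res with
        | true => simp only [if_true]; exact ih _ _ _ _ (by omega)
        | false =>
          simp only [Bool.false_eq_true, if_false]
          exact ih _ _ _ _ (by rw [pvWsum_cons, pvWsum_cons]; simp only [pvW, ← pow_succ]; omega)
      | gen2 m x y =>
        have h5 := pv8pow m
        simp only [pvW] at hS
        rw [pvRun.eq_def, pvRunW.eq_def]
        cases res with
        | true => simp only [if_true]; exact ih _ _ _ _ (by omega)
        | false =>
          simp only [Bool.false_eq_true, if_false]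
          exact ih _ _ _ _ (by rw [pvWsum_cons]; simp only [pvW, ← pow_succ]; omega)


lemma pvSum_take_succ (X : List Int) (n : Nat) :
    (X.take (n + 1)).sum = (X.take n).sum + X.getD n 0 := by
  rw [List.take_add_one]
  cases h : X[n]? with
  | none => simp [List.getD_eq_getElem?_getD, h]
  | some v => simp [List.getD_eq_getElem?_getD, h]

lemma pvSumLoop_eq (X : List Int) (c : Int) : pvSumLoop X c = (X.take c.toNat).sum := by
  unfold pvSumLoop
  generalize c.toNat = n
  induction n with
  | zero => simp
  | succ n ih => rw [List.range_succ, List.foldl_append, ih, pvSum_take_succ]; simp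

lemma pvSim (T : List Int) (k : Int) (f : Nat) :
    ∀ (i x y : Int) (X Y : List Int) (K : List PvFrame) (res : Bool),
      0 ≤ i → i ≤ (T.length : Int) → ((T.length : Int) - i).toNat < f →
      pvRunW T k (PvFrame.call ((T.length : Int) - i).toNat x y :: K) res X Y
        = pvRunW T k K (rekA T k f i x y X Y).1
            (rekA T k f i x y X Y).2.1 (rekA T k f i x y X Y).2.2 := by
  induction f with
  | zero => intro i x y X Y K res h0 hn hf; omega
  | succ f ih =>
    intro i x y X Y K res h0 hn hf
    by_cases hxy : x + y = k
    · rw [pvRunW.eq_def, rekA]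
      simp only [beq_iff_eq]
      rw [if_pos hxy, if_pos hxy]
      rw [pvSumLoop_eq, pvSumLoop_eq]
    · by_cases hi : i = (T.length : Int)
      · have hm0 : ((T.length : Int) - i).toNat = 0 := by omega
        rw [hm0, pvRunW.eq_def, rekA]
        simp only [beq_iff_eq]
        rw [if_neg hxy, if_neg hxy, if_pos hi]
      · obtain ⟨m', hm⟩ : ∃ m', ((T.length : Int) - i).toNat = m' + 1 :=
          ⟨((T.length : Int) - i).toNat - 1, by omega⟩
        have hm' : ((T.length : Int) - (i + 1)).toNat = m' := by omega
        have hidx : (T.length : Int) - ((m' + 1 : Nat) : Int) = i := by omega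
        have h0' : (0 : Int) ≤ i + 1 := by omega
        have hn' : i + 1 ≤ (T.length : Int) := by omega
        have hf' : ((T.length : Int) - (i + 1)).toNat < f := by omega
        rw [hm, pvRunW.eq_def, rekA]
        simp only [beq_iff_eq, hidx]
        rw [if_neg hxy, if_neg hxy, if_neg hi]
        by_cases hx : x = k - 1
        · rw [if_pos hx, if_pos hx]
          have IH1 := ih (i + 1) x y X Y (PvFrame.xfull (m' + 1) x y :: K) res h0' hn' hf'
          rw [hm'] at IH1
          rw [IH1]
          rcases hr1 : rekA T k f (i + 1) x y X Y with ⟨b1, X1, Y1⟩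
          rw [pvRunW.eq_def]
          simp only [Nat.add_sub_cancel, hidx]
          cases b1 with
          | true => simp only [if_true]
          | false =>
            simp only [Bool.false_eq_true, if_false]
            have IH2 := ih (i + 1) x (y + 1) X1 (Y1.set y.toNat (pvElem T i)) K false h0' hn' hf'
            rw [hm'] at IH2
            rw [IH2]
        · rw [if_neg hx, if_neg hx]
          by_cases hy : y = k - 1
          · rw [if_pos hy, if_pos hy]
            have IH1 := ih (i + 1) x y X Y (PvFrame.yfull (m' + 1) x y :: K) res h0' hn' hf'
            rw [hm'] at IH1
            rw [IH1]
            rcases hr1 : rekA T k f (i + 1) x y X Y with ⟨b1, X1, Y1⟩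
            rw [pvRunW.eq_def]
            simp only [Nat.add_sub_cancel, hidx]
            cases b1 with
            | true => simp only [if_true]
            | false =>
              simp only [Bool.false_eq_true, if_false]
              have IH2 := ih (i + 1) (x + 1) y (X1.set x.toNat (pvElem T i)) Y1 K false h0' hn' hf'
              rw [hm'] at IH2
              rw [IH2]
          · rw [if_neg hy, if_neg hy]
            have IH1 := ih (i + 1) x y (X.set x.toNat (pvElem T i)) (Y.set y.toNat (pvElem T i))
              (PvFrame.gen1 (m' + 1) x y :: K) res h0' hn' hf'
            rw [hm'] at IH1
            rw [IH1]
            rcases hr1 : rekA T k f (i + 1) x y (X.set x.toNat (pvElem T i))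
              (Y.set y.toNat (pvElem T i)) with ⟨b1, X1, Y1⟩
            rw [pvRunW.eq_def]
            simp only [Nat.add_sub_cancel]
            cases b1 with
            | true => simp only [if_true]
            | false =>
              simp only [Bool.false_eq_true, if_false]
              have IH2 := ih (i + 1) (x + 1) y X1 Y1 (PvFrame.gen2 (m' + 1) x y :: K) false h0' hn' hf'
              rw [hm'] at IH2
              rw [IH2]
              rcases hr2 : rekA T k f (i + 1) (x + 1) y X1 Y1 with ⟨b2, X2, Y2⟩
              rw [pvRunW.eq_def]
              simp only [Nat.add_sub_cancel]
              cases b2 with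
              | true => simp only [if_true]
              | false =>
                simp only [Bool.false_eq_true, if_false]
                have IH3 := ih (i + 1) x (y + 1) X2 Y2 K false h0' hn' hf'
                rw [hm'] at IH3
                rw [IH3]

-- ===== VERDICT (by name: the statement is the Claim_ definition above) =====
theorem zad32_spec : Claim_equal_zad32 := by
  intro T k _ _
  unfold Spec_zad32 zad32 zad32_alt
  rw [show ((if k > 1 then k - 1 else 0 : Int)).toNat = (k - 1).toNat by split <;> omega]
  rw [pvRun_fuel T k _ _ _ _ _ (le_refl _)]
  have h := pvSim T k (T.length + 1) 0 0 0
    (List.replicate (k - 1).toNat 0) (List.replicate (k - 1).toNat 0) [] false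
    (by omega) (by positivity) (by omega)
  simp only [Int.sub_zero, Int.toNat_natCast] at h
  rw [h, pvRunW.eq_def]
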